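-- pv_equiv track=rewrite | github.com/rhelmstedter/pybites | 189/control_flow.py | filter_names
-- ===== SOURCE A (Python) =====
-- from typing import List
--
-- IGNORE_CHAR = "b"
--
-- QUIT_CHAR = "q"
--
-- MAX_NAMES = 5
--
-- def filter_names(names: List[str]) -> List[str]:
--     filtered = []
--     for name in names:
--         if name.startswith(IGNORE_CHAR):
--             continue
--         elif not name.isalpha():
--             continue
--         elif name.startswith(QUIT_CHAR):
--             break
--         elif len(filtered) == MAX_NAMES:
--             break
--         else:
--             filtered.append(name)
--
--     return filtered
-- ===== SOURCE B (Python) =====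
-- from typing import List
--
-- IGNORE_CHAR = "b"
--
-- QUIT_CHAR = "q"
--
-- MAX_NAMES = 5
--
-- def _keepable(name: str) -> bool:
--     return name.isalpha() and not name.startswith(IGNORE_CHAR)
--
-- def filter_names(names: List[str]) -> List[str]:
--     stop = next((i for i, n in enumerate(names)
--                  if _keepable(n) and n.startswith(QUIT_CHAR)), len(names))
--     return [n for n in names[:stop] if _keepable(n)][:MAX_NAMES]
-- ===== Notes on version B (the rewrite author's own statement) =====
-- stated objective: alternative
-- what changed: A's single loop with interleaved continue/break and an accumulator is replaced by a three-stage pipeline: find the index of the first terminating name, slice the list up to it, filter keepable names, and cap the result at MAX_NAMES.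
import Mathlib
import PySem

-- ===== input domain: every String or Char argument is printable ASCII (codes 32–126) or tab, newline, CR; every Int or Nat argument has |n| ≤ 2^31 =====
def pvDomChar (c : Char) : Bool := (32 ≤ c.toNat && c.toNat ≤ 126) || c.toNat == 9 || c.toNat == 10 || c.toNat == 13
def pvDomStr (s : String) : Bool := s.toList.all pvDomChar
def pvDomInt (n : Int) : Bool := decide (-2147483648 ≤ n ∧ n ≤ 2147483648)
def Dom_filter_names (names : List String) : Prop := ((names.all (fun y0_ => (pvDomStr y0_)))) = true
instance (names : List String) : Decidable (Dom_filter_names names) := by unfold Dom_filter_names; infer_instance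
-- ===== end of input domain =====

-- B replaces A's single loop with interleaved continue/break by a three-stage pipeline
-- (find the stop index, slice, filter, cap at 5): same values, different decomposition ('alternative').

-- ===== PORT A =====
-- A's for-loop with continue/break and the 'filtered' accumulator, step for step.
def filterLoopA : List String → List String → List String
  | acc, [] => acc
  | acc, name :: rest =>
    if PySem.Str.startswith name "b" then filterLoopA acc rest
    else if !PySem.Str.strIsalpha name then filterLoopA acc rest
    else if PySem.Str.startswith name "q" then acc
    else if acc.length = 5 then acc
    else filterLoopA (acc ++ [name]) rest

def filter_names (names : List String) : List String := filterLoopA [] names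

-- ===== PORT B =====
-- Source B's _keepable(name)
def keepableB (name : String) : Bool :=
  PySem.Str.strIsalpha name && !PySem.Str.startswith name "b"

-- Source B's generator predicate for the stop index
def quitterB (name : String) : Bool := keepableB name && PySem.Str.startswith name "q"

-- stop = next((i for i,n in enumerate(names) if …), len(names)); List.findIdx returns
-- the first index satisfying the predicate, or the length if none — exactly that.
def filter_names_alt (names : List String) : List String :=
  let stop := names.findIdx quitterB
  ((names.take stop).filter keepableB).take 5

-- ===== PRECONDITION & SPEC =====
def Spec_filter_names (names : List String) (out : List String) : Prop := out = filter_names_alt names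
instance (names : List String) (out : List String) : Decidable (Spec_filter_names names out) := by unfold Spec_filter_names; infer_instance

-- ===== CLAIM (what is proved, stated in full; the proofs are below) =====
def Claim_equal_filter_names : Prop := ∀ (names : List String), Dom_filter_names names → Spec_filter_names names (filter_names names)

-- ===== LEMMAS AND PROOFS =====

theorem filterLoopA_eq (names : List String) : ∀ (acc : List String), acc.length ≤ 5 →
    filterLoopA acc names =
      acc ++ (((names.take (names.findIdx quitterB)).filter keepableB).take (5 - acc.length)) := by
  induction names with
  | nil => intro acc _; simp [filterLoopA]
  | cons n rest ih =>
    intro acc hacc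
    simp only [filterLoopA, List.findIdx_cons, PySem.Str.startswith_eq, PySem.Str.strIsalpha_eq]
    by_cases hb : PySem.Chars.startswith n.toList ['b'] = true
    · have hk : keepableB n = false := by simp [keepableB, hb]
      have hq : quitterB n = false := by simp [quitterB, hk]
      simp [hb, hq, hk, ih acc hacc]
    · by_cases ha : PySem.Chars.strIsalpha n.toList = true
      · by_cases hqs : PySem.Chars.startswith n.toList ['q'] = true
        · have hq : quitterB n = true := by
            simp [quitterB, keepableB, ha, hqs]
            simpa using hb
          simp [hb, ha, hqs, hq]
        · have hk : keepableB n = true := by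
            simp [keepableB, ha]
            simpa using hb
          have hq : quitterB n = false := by
            simp [quitterB]
            intro _
            simpa using hqs
          by_cases hlen : acc.length = 5
          · simp [hb, ha, hqs, hlen, hq, hk]
          · have h5 : (acc ++ [n]).length ≤ 5 := by
              simp; omega
            have harith : 5 - acc.length = (5 - (acc.length + 1)) + 1 := by omega
            simp [hb, ha, hqs, hlen, hq, hk, ih (acc ++ [n]) h5, harith, List.take_succ_cons]
      · have ha' : PySem.Chars.strIsalpha n.toList = false := by simpa using ha
        have hk : keepableB n = false := by simp [keepableB, ha']
        have hq : quitterB n = false := by simp [quitterB, hk]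
        simp [hb, ha', hq, hk, ih acc hacc]

-- ===== VERDICT (by name: the statement is the Claim_ definition above) =====
theorem filter_names_spec : Claim_equal_filter_names := by
  intro names _
  unfold Spec_filter_names filter_names filter_names_alt
  simpa using filterLoopA_eq names [] (by simp)
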